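-- pv_equiv track=rewrite | github.com/erpangilinan/Akda | QuastCombine/QuastCombine.py | AbsoluteDistanceRank
-- ===== SOURCE A (Python) =====
-- def AbsoluteDistanceRank(numlist, center):
-- 	"""Arranges a list of numbers according to the absolute distance from a given number; Closest to Furthest"""
-- 	absdist = []
-- 	dictionary = {}
-- 	for num in numlist:
-- 		distance = abs(num - center)
-- 		dictionary[num] = distance
-- 		absdist.append(distance)
-- 	absdist.sort()
--
-- 	ranks = []
-- 	for num in numlist:
-- 		rank = absdist.index(dictionary[num]) + 1
-- 		ranks.append(rank)
--
-- 	out = [x for _,x in sorted(zip(ranks,numlist))]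
--
-- 	return out
-- ===== SOURCE B (Python) =====
-- def AbsoluteDistanceRank(numlist, center):
--     """Arranges a list of numbers according to the absolute distance from a given number; Closest to Furthest"""
--     s = sorted(numlist)
--     right = 0
--     while right < len(s) and s[right] < center:
--         right += 1
--     left = right - 1
--     out = []
--     while left >= 0 and right < len(s):
--         if abs(s[left] - center) <= abs(s[right] - center):
--             out.append(s[left])
--             left -= 1
--         else:
--             out.append(s[right])
--             right += 1
--     while left >= 0:
--         out.append(s[left])
--         left -= 1
--     while right < len(s):
--         out.append(s[right])
--         right += 1
--     return out
-- ===== Notes on version B (the rewrite author's own statement) =====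
-- stated objective: faster
-- what changed: A builds a distance dict, sorts the distances, computes each element's rank with a repeated list.index scan and then sorts (rank, num) pairs; B sorts the list once and merges outward from the center with two pointers (closest first, ties to the smaller left value), with no rank table and no second sort.
import Mathlib
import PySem

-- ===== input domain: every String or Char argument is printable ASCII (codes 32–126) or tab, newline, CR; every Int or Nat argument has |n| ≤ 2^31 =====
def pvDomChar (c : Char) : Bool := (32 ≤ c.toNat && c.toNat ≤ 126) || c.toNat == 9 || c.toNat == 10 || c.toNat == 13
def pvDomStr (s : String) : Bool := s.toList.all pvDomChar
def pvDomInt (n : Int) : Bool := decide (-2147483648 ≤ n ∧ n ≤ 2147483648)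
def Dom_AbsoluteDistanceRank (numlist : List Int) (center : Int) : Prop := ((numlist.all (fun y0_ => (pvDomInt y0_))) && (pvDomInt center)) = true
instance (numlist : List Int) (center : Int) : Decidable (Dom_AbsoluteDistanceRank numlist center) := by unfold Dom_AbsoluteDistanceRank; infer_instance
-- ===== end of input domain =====

-- B sorts once and merges two pointers outward from the center instead of A's rank table
-- with a repeated list.index scan (objective: faster).

-- ===== PORT A =====
def AbsoluteDistanceRank (numlist : List Int) (center : Int) : List Int :=
  -- first loop: builds dictionary and absdist together
  let st := numlist.foldl
      (fun (st : PySem.Dict Int Int × List Int) num =>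
        (st.1.insert num (|num - center|), st.2 ++ [|num - center|]))
      (PySem.Dict.empty, [])
  let dictionary := st.1
  let absdist := PySem.List.sorted st.2 (fun x => x)   -- absdist.sort()
  -- second loop: ranks; dictionary[num] and absdist.index(...) always succeed
  -- (num was inserted in the first loop and its distance appended), so .getD defaults are dead
  let ranks := numlist.foldl
      (fun (acc : List Int) num =>
        acc ++ [(((PySem.List.index? absdist ((dictionary.get? num).getD 0)).getD 0 : Nat) : Int) + 1])
      []
  -- sorted(zip(ranks, numlist)) compares int pairs lexicographically = sorted2 on both components
  (PySem.List.sorted2 (ranks.zip numlist) (fun p => p.1) (fun p => p.2)).map (fun p => p.2)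

-- ===== PORT B =====
-- first while: advance right past the elements below center (indices stay ≥ 0, so Nat is exact)
def pvScan (s : List Int) (center : Int) (right : Nat) : Nat :=
  if h : right < s.length ∧ PySem.List.pyGetD s (right : Int) 0 < center then
    pvScan s center (right + 1)
  else right
termination_by s.length - right
decreasing_by omega

-- second while: drain the left pointer (guard 0 ≤ left keeps the index in range)
def pvDrainLeft (s : List Int) (left : Int) (out : List Int) : List Int :=
  if h : 0 ≤ left then
    pvDrainLeft s (left - 1) (out ++ [PySem.List.pyGetD s left 0])
  else out
termination_by (left + 1).toNat
decreasing_by omega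

-- third while: drain the right pointer
def pvDrainRight (s : List Int) (right : Nat) (out : List Int) : List Int :=
  if h : right < s.length then
    pvDrainRight s (right + 1) (out ++ [PySem.List.pyGetD s (right : Int) 0])
  else out
termination_by s.length - right
decreasing_by omega

-- main while, then the two drain loops in source order
def pvMergeBoth (s : List Int) (center : Int) (left : Int) (right : Nat) (out : List Int) : List Int :=
  if h : 0 ≤ left ∧ right < s.length then
    if |PySem.List.pyGetD s left 0 - center| ≤ |PySem.List.pyGetD s (right : Int) 0 - center| then
      pvMergeBoth s center (left - 1) right (out ++ [PySem.List.pyGetD s left 0])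
    else
      pvMergeBoth s center left (right + 1) (out ++ [PySem.List.pyGetD s (right : Int) 0])
  else
    pvDrainRight s right (pvDrainLeft s left out)
termination_by (left + 1).toNat + (s.length - right)
decreasing_by all_goals omega

def AbsoluteDistanceRank_alt (numlist : List Int) (center : Int) : List Int :=
  let s := PySem.List.sorted numlist (fun x => x)
  let right := pvScan s center 0
  pvMergeBoth s center ((right : Int) - 1) right []

-- ===== PRECONDITION & SPEC =====
def Spec_AbsoluteDistanceRank (numlist : List Int) (center : Int) (out : List Int) : Prop := out = AbsoluteDistanceRank_alt numlist center
instance (numlist : List Int) (center : Int) (out : List Int) : Decidable (Spec_AbsoluteDistanceRank numlist center out) := by unfold Spec_AbsoluteDistanceRank; infer_instance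

-- ===== CLAIM (what is proved, stated in full; the proofs are below) =====
def Claim_equal_AbsoluteDistanceRank : Prop := ∀ (numlist : List Int) (center : Int), Dom_AbsoluteDistanceRank numlist center → Spec_AbsoluteDistanceRank numlist center (AbsoluteDistanceRank numlist center)

-- ===== LEMMAS AND PROOFS =====

-- the common sort key: (absolute distance from center, the number itself), lexicographically
def pvKey (center n : Int) : Lex (Int × Int) := toLex (|n - center|, n)

-- proof-side merge of two lists, closest-to-center first, ties to the left list
def pvMergeList (center : Int) : List Int → List Int → List Int
  | [], R => R
  | L, [] => L
  | a :: L, b :: R =>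
      if |a - center| ≤ |b - center| then a :: pvMergeList center L (b :: R)
      else b :: pvMergeList center (a :: L) R
termination_by L R => L.length + R.length
lemma pvMergeList_nil_left (c : Int) (R : List Int) : pvMergeList c [] R = R := by
  cases R <;> rw [pvMergeList.eq_def]
lemma pvMergeList_nil_right (c : Int) (L : List Int) : pvMergeList c L [] = L := by
  cases L <;> rw [pvMergeList.eq_def]
lemma pvMergeList_cons_cons (c a b : Int) (L R : List Int) :
    pvMergeList c (a :: L) (b :: R) =
      if |a - c| ≤ |b - c| then a :: pvMergeList c L (b :: R)
      else b :: pvMergeList c (a :: L) R := by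
  rw [pvMergeList.eq_def]

lemma pvMergeList_perm (c : Int) (L R : List Int) : (pvMergeList c L R).Perm (L ++ R) := by
  fun_induction pvMergeList c L R with
  | case1 R => simp
  | case2 L h => simp
  | case3 a L b R hle ih => simpa using ih.cons a
  | case4 a L b R hle ih => exact (ih.cons b).trans (List.perm_middle).symm

lemma pvKey_le_iff (c x y : Int) : pvKey c x ≤ pvKey c y ↔
    (|x - c| < |y - c| ∨ (|x - c| = |y - c| ∧ x ≤ y)) := by
  simp [pvKey, Prod.Lex.le_iff]
lemma pvKey_le_of_left_left {c x y : Int} (hx : x < c) (hy : y < c) (hxy : y ≤ x) :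
    pvKey c x ≤ pvKey c y := by
  rw [pvKey_le_iff, abs_of_neg (by omega : x - c < 0), abs_of_neg (by omega : y - c < 0)]; omega
lemma pvKey_le_of_right_right {c x y : Int} (hx : c ≤ x) (hxy : x ≤ y) :
    pvKey c x ≤ pvKey c y := by
  rw [pvKey_le_iff, abs_of_nonneg (by omega : (0:Int) ≤ x - c),
    abs_of_nonneg (by omega : (0:Int) ≤ y - c)]; omega
lemma pvKey_le_of_cross {c x y : Int} (hx : x < c) (hy : c ≤ y) (h : |x - c| ≤ |y - c|) :
    pvKey c x ≤ pvKey c y := by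
  rw [pvKey_le_iff]
  rw [abs_of_neg (by omega : x - c < 0)] at h ⊢
  rw [abs_of_nonneg (by omega : (0:Int) ≤ y - c)] at h ⊢
  omega
lemma pvKey_le_of_cross' {c x y : Int} (h : ¬ |x - c| ≤ |y - c|) :
    pvKey c y ≤ pvKey c x := by
  rw [pvKey_le_iff]; omega

lemma pvMergeList_mem (c : Int) (L R : List Int) (x : Int) :
    x ∈ pvMergeList c L R ↔ x ∈ L ∨ x ∈ R := by
  rw [(pvMergeList_perm c L R).mem_iff, List.mem_append]

lemma pvMergeList_pairwise (c : Int) (L R : List Int)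
    (hL : L.Pairwise (fun a b => b ≤ a)) (hR : R.Pairwise (fun a b => a ≤ b))
    (hLc : ∀ x ∈ L, x < c) (hRc : ∀ x ∈ R, c ≤ x) :
    (pvMergeList c L R).Pairwise (fun a b => pvKey c a ≤ pvKey c b) := by
  induction L, R using pvMergeList.induct c with
  | case1 R =>
      rw [pvMergeList_nil_left]
      exact hR.imp_of_mem (fun {a b} ha hb hab => pvKey_le_of_right_right (hRc _ ha) hab)
  | case2 L h =>
      rw [pvMergeList_nil_right]
      exact hL.imp_of_mem (fun {a b} ha hb hab =>
        pvKey_le_of_left_left (hLc _ ha) (hLc _ hb) hab)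
  | case3 a L b R hle ih =>
      rw [pvMergeList_cons_cons, if_pos hle]
      obtain ⟨haL, hL'⟩ := List.pairwise_cons.1 hL
      have hac : a < c := hLc a List.mem_cons_self
      have hbc : c ≤ b := hRc b List.mem_cons_self
      refine List.pairwise_cons.2 ⟨?_, ih hL' hR (fun x hx => hLc x (List.mem_cons_of_mem _ hx)) hRc⟩
      intro y hy
      rcases (pvMergeList_mem c L (b :: R) y).1 hy with hyL | hyR
      · exact pvKey_le_of_left_left hac (hLc y (List.mem_cons_of_mem _ hyL)) (haL y hyL)
      · rcases List.mem_cons.1 hyR with rfl | hyR'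
        · exact pvKey_le_of_cross hac hbc hle
        · exact (pvKey_le_of_cross hac hbc hle).trans
            (pvKey_le_of_right_right hbc ((List.pairwise_cons.1 hR).1 y hyR'))
  | case4 a L b R hle ih =>
      rw [pvMergeList_cons_cons, if_neg hle]
      obtain ⟨hbR, hR'⟩ := List.pairwise_cons.1 hR
      have hac : a < c := hLc a List.mem_cons_self
      have hbc : c ≤ b := hRc b List.mem_cons_self
      refine List.pairwise_cons.2 ⟨?_, ih hL hR' hLc (fun x hx => hRc x (List.mem_cons_of_mem _ hx))⟩
      intro y hy
      rcases (pvMergeList_mem c (a :: L) R y).1 hy with hyL | hyR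
      · rcases List.mem_cons.1 hyL with rfl | hyL'
        · exact pvKey_le_of_cross' hle
        · exact (pvKey_le_of_cross' hle).trans
            (pvKey_le_of_left_left hac (hLc y (List.mem_cons_of_mem _ hyL'))
              ((List.pairwise_cons.1 hL).1 y hyL'))
      · exact pvKey_le_of_right_right hbc (hbR y hyR)

lemma pvDrainLeft_eq (s : List Int) :
    ∀ (n : Nat) (left : Int) (out : List Int), (left + 1).toNat = n → left < (s.length : Int) →
      pvDrainLeft s left out = out ++ (s.take (left + 1).toNat).reverse := by
  intro n
  induction n with
  | zero =>
      intro left out hn _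
      rw [pvDrainLeft, dif_neg (by omega : ¬ (0:Int) ≤ left)]
      simp [hn]
  | succ n ih =>
      intro left out hn hlen
      have h0 : 0 ≤ left := by omega
      have hlt : left.toNat < s.length := by omega
      rw [pvDrainLeft, dif_pos h0, ih (left - 1) _ (by omega) (by omega)]
      rw [PySem.List.pyGetD_eq_getElem s 0 h0 hlen]
      have : (left + 1).toNat = left.toNat + 1 := by omega
      rw [this, (by omega : (left - 1 + 1).toNat = left.toNat)]
      rw [show List.take (left.toNat + 1) s = List.take left.toNat s ++ [s[left.toNat]] by
        rw [List.take_add_one, List.getElem?_eq_getElem hlt]; rfl]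
      simp only [List.reverse_append, List.reverse_singleton, List.append_assoc,
        List.singleton_append]

lemma pvDrainRight_eq (s : List Int) :
    ∀ (n right : Nat) (out : List Int), s.length - right ≤ n →
      pvDrainRight s right out = out ++ s.drop right := by
  intro n
  induction n with
  | zero =>
      intro right out h
      rw [pvDrainRight, dif_neg (by omega)]
      rw [List.drop_eq_nil_of_le (by omega), List.append_nil]
  | succ n ih =>
      intro right out h
      by_cases hlt : right < s.length
      · rw [pvDrainRight, dif_pos hlt, ih _ _ (by omega)]
        rw [PySem.List.pyGetD_eq_getElem s 0 (by omega) (by exact_mod_cast hlt)]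
        rw [List.drop_eq_getElem_cons hlt]
        simp
      · rw [pvDrainRight, dif_neg hlt, List.drop_eq_nil_of_le (by omega), List.append_nil]

lemma pvMergeBoth_eq (s : List Int) (c : Int) :
    ∀ (n : Nat) (left : Int) (right : Nat) (out : List Int),
      (left + 1).toNat + (s.length - right) ≤ n → left < (s.length : Int) →
      pvMergeBoth s c left right out = out ++ pvMergeList c ((s.take (left + 1).toNat).reverse) (s.drop right) := by
  intro n
  induction n with
  | zero =>
      intro left right out hn hlen
      have h0 : left < 0 := by omega
      have hr : s.length ≤ right := by omega
      rw [pvMergeBoth, dif_neg (by omega)]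
      rw [pvDrainLeft, dif_neg (by omega : ¬ (0:Int) ≤ left)]
      rw [pvDrainRight, dif_neg (by omega)]
      rw [(by omega : (left + 1).toNat = 0), List.drop_eq_nil_of_le hr]
      simp [pvMergeList_nil_left]
  | succ n ih =>
      intro left right out hn hlen
      by_cases h : 0 ≤ left ∧ right < s.length
      · have hlt : left.toNat < s.length := by omega
        have hL : (s.take (left + 1).toNat).reverse = s[left.toNat] :: (s.take left.toNat).reverse := by
          rw [(by omega : (left + 1).toNat = left.toNat + 1), List.take_add_one]
          simp [List.getElem?_eq_getElem hlt]
        have hR : s.drop right = s[right] :: s.drop (right + 1) := List.drop_eq_getElem_cons h.2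
        rw [pvMergeBoth, dif_pos h]
        rw [PySem.List.pyGetD_eq_getElem s 0 h.1 hlen,
            PySem.List.pyGetD_eq_getElem s 0 (by omega) (by exact_mod_cast h.2)]
        simp only [Int.toNat_natCast]
        rw [hL, hR, pvMergeList_cons_cons]
        by_cases hle : |s[left.toNat] - c| ≤ |s[right] - c|
        · rw [if_pos hle, if_pos hle, ih (left - 1) right _ (by omega) (by omega)]
          rw [(by omega : (left - 1 + 1).toNat = left.toNat)]
          rw [← hR]
          simp
        · rw [if_neg hle, if_neg hle, ih left (right + 1) _ (by omega) hlen]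
          rw [← hL]
          simp
      · rw [pvMergeBoth, dif_neg h]
        rcases not_and_or.1 h with h0 | hr
        · have : (left + 1).toNat = 0 := by omega
          rw [this]
          rw [pvDrainLeft, dif_neg (by omega : ¬ (0:Int) ≤ left)]
          rw [pvDrainRight_eq s (s.length) right out (by omega)]
          simp [pvMergeList_nil_left]
        · have hlen' : s.length ≤ right := by omega
          rw [List.drop_eq_nil_of_le hlen', pvMergeList_nil_right]
          rw [pvDrainRight, dif_neg (by omega)]
          exact pvDrainLeft_eq s _ left out rfl hlen

lemma pvScan_spec (s : List Int) (c : Int)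
    (hmono : ∀ (i j : Nat) (hij : i ≤ j) (hj : j < s.length), s[i] ≤ s[j]) :
    ∀ (n right : Nat), s.length - right ≤ n → right ≤ s.length →
      (∀ (i : Nat) (h : i < s.length), i < right → s[i] < c) →
      pvScan s c right ≤ s.length ∧
      (∀ (i : Nat) (h : i < s.length), i < pvScan s c right → s[i] < c) ∧
      (∀ (i : Nat) (h : i < s.length), pvScan s c right ≤ i → c ≤ s[i]) := by
  intro n
  induction n with
  | zero =>
      intro right hfuel hr hbelow
      have hre : right = s.length := by omega
      rw [pvScan, dif_neg (by omega)]
      exact ⟨hr, fun i h hi => hbelow i h hi, fun i h hi => by omega⟩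
  | succ n ih =>
      intro right hfuel hr hbelow
      by_cases hend : right < s.length
      · have hget : PySem.List.pyGetD s (right : Int) 0 = s[right] := by
          rw [PySem.List.pyGetD_eq_getElem s 0 (by omega) (by exact_mod_cast hend)]
          simp
        by_cases hlt : s[right] < c
        · rw [pvScan, dif_pos ⟨hend, by rw [hget]; exact hlt⟩]
          exact ih (right + 1) (by omega) (by omega)
            (fun i h hi => by
              rcases Nat.lt_succ_iff_lt_or_eq.1 hi with h' | h'
              · exact hbelow i h h'
              · subst h'; exact hlt)
        · rw [pvScan, dif_neg (by rw [hget]; tauto)]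
          refine ⟨by omega, fun i h hi => hbelow i h hi, fun i h hi => ?_⟩
          exact le_trans (not_lt.1 hlt) (hmono right i hi h)
      · rw [pvScan, dif_neg (by omega)]
        exact ⟨by omega, fun i h hi => hbelow i h hi, fun i h hi => by omega⟩

lemma pvKey_inj (c : Int) : Function.Injective (pvKey c) := by
  intro a b h
  simpa [pvKey] using congrArg (fun p => (ofLex p).2) h

-- ===== B-side characterisation =====
lemma pvSorted_mono (numlist : List Int) :
    ∀ (i j : Nat) (hij : i ≤ j) (hj : j < (PySem.List.sorted numlist (fun x => x)).length),
      (PySem.List.sorted numlist (fun x => x))[i] ≤ (PySem.List.sorted numlist (fun x => x))[j] :=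
  fun _ _ hij hj => PySem.List.sorted_id_getElem_mono numlist hij hj

lemma alt_eq (numlist : List Int) (c : Int) :
    AbsoluteDistanceRank_alt numlist c =
    pvMergeList c (((PySem.List.sorted numlist (fun x => x)).take
        (pvScan (PySem.List.sorted numlist (fun x => x)) c 0)).reverse)
      ((PySem.List.sorted numlist (fun x => x)).drop
        (pvScan (PySem.List.sorted numlist (fun x => x)) c 0)) := by
  have hspec := pvScan_spec (PySem.List.sorted numlist (fun x => x)) c (pvSorted_mono numlist)
    (PySem.List.sorted numlist (fun x => x)).length 0 (by omega) (by omega)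
    (fun i h hi => absurd hi (by omega))
  show pvMergeBoth _ c _ _ [] = _
  rw [pvMergeBoth_eq _ c ((PySem.List.sorted numlist (fun x => x)).length + 1) _ _ _
    (by omega) (by omega)]
  rw [(by omega : ((pvScan (PySem.List.sorted numlist (fun x => x)) c 0 : Int) - 1 + 1).toNat =
    pvScan (PySem.List.sorted numlist (fun x => x)) c 0)]
  rw [List.nil_append]

lemma alt_perm (numlist : List Int) (c : Int) : (AbsoluteDistanceRank_alt numlist c).Perm numlist := by
  rw [alt_eq]
  refine (pvMergeList_perm _ _ _).trans ?_
  refine (((List.reverse_perm _).append (List.Perm.refl _)).trans ?_)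
  rw [List.take_append_drop]
  exact PySem.List.sorted_perm numlist (fun x => x) false

lemma alt_pairwise (numlist : List Int) (c : Int) :
    (AbsoluteDistanceRank_alt numlist c).Pairwise (fun a b => pvKey c a ≤ pvKey c b) := by
  have hs : (PySem.List.sorted numlist (fun x => x)).Pairwise (fun a b => a ≤ b) := by
    simpa using PySem.List.sorted_pairwise numlist (fun x => x)
  have hspec := pvScan_spec (PySem.List.sorted numlist (fun x => x)) c (pvSorted_mono numlist)
    (PySem.List.sorted numlist (fun x => x)).length 0 (by omega) (by omega)
    (fun i h hi => absurd hi (by omega))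
  rw [alt_eq]
  refine pvMergeList_pairwise c _ _ ?_ ?_ ?_ ?_
  · exact List.pairwise_reverse.2 (hs.sublist (List.take_sublist _ _))
  · exact hs.sublist (List.drop_sublist _ _)
  · intro x hx
    rw [List.mem_reverse] at hx
    obtain ⟨i, hi, rfl⟩ := List.mem_iff_getElem.1 hx
    simp only [List.length_take, lt_min_iff] at hi
    rw [List.getElem_take]
    exact hspec.2.1 i hi.2 hi.1
  · intro x hx
    obtain ⟨i, hi, rfl⟩ := List.mem_iff_getElem.1 hx
    simp only [List.length_drop] at hi
    rw [List.getElem_drop]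
    exact hspec.2.2 _ (by omega) (by omega)

-- ===== A-side characterisation =====
def pvSDist (numlist : List Int) (center : Int) : List Int :=
  PySem.List.sorted (numlist.map (fun n => |n - center|)) (fun x => x)

def pvRank (numlist : List Int) (center n : Int) : Int :=
  (((PySem.List.index? (pvSDist numlist center) (|n - center|)).getD 0 : Nat) : Int) + 1

lemma pvDict_get_not_mem (c : Int) (l : List Int) (d : PySem.Dict Int Int) (v : Int) (hv : v ∉ l) :
    (l.foldl (fun d num => d.insert num (|num - c|)) d).get? v = d.get? v := by
  induction l generalizing d with
  | nil => rfl
  | cons x l ih =>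
    simp only [List.foldl_cons]
    have hne : v ≠ x := fun h => hv (by simp [h])
    rw [ih _ (fun h => hv (List.mem_cons_of_mem _ h))]
    rw [PySem.Dict.get?_insert]
    simp only [if_neg hne]

lemma pvDict_get_mem (c : Int) (l : List Int) (d : PySem.Dict Int Int) (v : Int) (hv : v ∈ l) :
    (l.foldl (fun d num => d.insert num (|num - c|)) d).get? v = some (|v - c|) := by
  induction l generalizing d with
  | nil => cases hv
  | cons x l ih =>
    simp only [List.foldl_cons]
    by_cases hm : v ∈ l
    · exact ih _ hm
    · have hvx : v = x := by rcases List.mem_cons.1 hv with h | h; exact h; exact absurd h hm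
      subst hvx
      rw [pvDict_get_not_mem _ _ _ _ hm, PySem.Dict.get?_insert_self]

lemma sorted2_lex (xs : List (Int × Int)) :
    PySem.List.sorted2 xs (fun p => p.1) (fun p => p.2) =
    PySem.List.sorted xs (fun p => (toLex p : Lex (Int × Int))) := by
  have hfn : (fun (a b : Int × Int) =>
      (decide (a.1 < b.1) || (!decide (b.1 < a.1) && decide (a.2 < b.2)))) =
      (fun (a b : Int × Int) => decide ((toLex a : Lex (Int × Int)) < toLex b)) := by
    funext a b
    rcases lt_trichotomy a.1 b.1 with h | h | h
    · simp [Prod.Lex.lt_iff, h]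
    · simp [Prod.Lex.lt_iff, h]
    · simp [Prod.Lex.lt_iff, h, lt_asymm h, h.ne']
  rw [PySem.List.sorted_eq_foldl_insertBy]
  unfold PySem.List.sorted2
  simp only [Bool.false_eq_true, if_false, hfn]

lemma pvIdx_lt (nl : List Int) (c : Int) {d1 d2 : Int}
    (h1 : d1 ∈ pvSDist nl c) (h2 : d2 ∈ pvSDist nl c) (hlt : d1 < d2) :
    ((PySem.List.index? (pvSDist nl c) d1).getD 0) < ((PySem.List.index? (pvSDist nl c) d2).getD 0) := by
  unfold pvSDist at h1 h2 ⊢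
  obtain ⟨k1, hk1⟩ := Option.isSome_iff_exists.1 ((PySem.List.index?_isSome_iff _ _).2 h1)
  obtain ⟨k2, hk2⟩ := Option.isSome_iff_exists.1 ((PySem.List.index?_isSome_iff _ _).2 h2)
  obtain ⟨hl1, he1, -⟩ := PySem.List.getElem_of_index?_eq_some hk1
  obtain ⟨hl2, he2, -⟩ := PySem.List.getElem_of_index?_eq_some hk2
  rw [hk1, hk2]
  simp only [Option.getD_some]
  by_contra hle
  have hk : k2 ≤ k1 := by omega
  have hmono := PySem.List.sorted_id_getElem_mono (nl.map (fun n => |n - c|)) hk hl1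
  rw [he1, he2] at hmono
  omega

lemma pvRank_mono (nl : List Int) (c : Int) {m n : Int} (hm : |m - c| ∈ pvSDist nl c)
    (hn : |n - c| ∈ pvSDist nl c)
    (h : (toLex (pvRank nl c m, m) : Lex (Int × Int)) ≤ toLex (pvRank nl c n, n)) :
    pvKey c m ≤ pvKey c n := by
  rcases Prod.Lex.le_iff.1 h with hlt | ⟨heq, hle⟩
  · simp only [ofLex_toLex] at hlt
    have hidx : ((PySem.List.index? (pvSDist nl c) (|m - c|)).getD 0) <
        ((PySem.List.index? (pvSDist nl c) (|n - c|)).getD 0) := by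
      unfold pvRank at hlt; omega
    have hd : |m - c| < |n - c| := by
      rcases lt_trichotomy (|m - c|) (|n - c|) with h' | h' | h'
      · exact h'
      · rw [h'] at hidx; omega
      · exact absurd (pvIdx_lt nl c hn hm h') (by omega)
    exact (pvKey_le_iff c m n).2 (Or.inl hd)
  · simp only [ofLex_toLex] at heq hle
    have hidx : ((PySem.List.index? (pvSDist nl c) (|m - c|)).getD 0) =
        ((PySem.List.index? (pvSDist nl c) (|n - c|)).getD 0) := by
      unfold pvRank at heq; omega
    have hd : |m - c| = |n - c| := by
      rcases lt_trichotomy (|m - c|) (|n - c|) with h' | h' | h'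
      · exact absurd (pvIdx_lt nl c hm hn h') (by omega)
      · exact h'
      · exact absurd (pvIdx_lt nl c hn hm h') (by omega)
    exact (pvKey_le_iff c m n).2 (Or.inr ⟨hd, hle⟩)

lemma pvZipMapSelf (f : Int → Int) (l : List Int) :
    (l.map f).zip l = l.map (fun a => (f a, a)) := by
  induction l with
  | nil => rfl
  | cons x l ih => simp [ih]

lemma A_eq (numlist : List Int) (c : Int) :
    AbsoluteDistanceRank numlist c =
    (PySem.List.sorted (numlist.map (fun n => (pvRank numlist c n, n)))
      (fun p => (toLex p : Lex (Int × Int)))).map (fun p => p.2) := by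
  unfold AbsoluteDistanceRank
  simp only []
  rw [PySem.List.foldl_prod_mk (fun (d : PySem.Dict Int Int) (num : Int) => d.insert num (|num - c|))
    (fun (l : List Int) (num : Int) => l ++ [|num - c|])]
  dsimp only
  rw [PySem.List.foldl_append_singleton_eq_map (fun (num : Int) => |num - c|)]
  rw [PySem.List.foldl_append_singleton_eq_map (fun (num : Int) =>
    (((PySem.List.index? (PySem.List.sorted ([] ++ numlist.map (fun num => |num - c|)) (fun x => x))
      (((numlist.foldl (fun d num => d.insert num (|num - c|)) PySem.Dict.empty).get? num).getD 0)).getD 0 : Nat) : Int) + 1)]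
  rw [List.nil_append, List.nil_append]
  have hmapeq : numlist.map (fun num =>
        (((PySem.List.index? (PySem.List.sorted (numlist.map (fun num => |num - c|)) (fun x => x))
          (((numlist.foldl (fun d num => d.insert num (|num - c|)) PySem.Dict.empty).get? num).getD 0)).getD 0 : Nat) : Int) + 1) =
      numlist.map (fun n => pvRank numlist c n) := by
    refine List.map_congr_left ?_
    intro n hn
    rw [pvDict_get_mem c numlist _ n hn, Option.getD_some]
    rfl
  rw [hmapeq, pvZipMapSelf, sorted2_lex]

lemma A_perm (numlist : List Int) (c : Int) : (AbsoluteDistanceRank numlist c).Perm numlist := by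
  rw [A_eq]
  have h1 := (PySem.List.sorted_perm (numlist.map (fun n => (pvRank numlist c n, n)))
    (fun p => (toLex p : Lex (Int × Int))) false).map (fun p => p.2)
  simpa [List.map_map, Function.comp_def] using h1

lemma A_pairwise (numlist : List Int) (c : Int) :
    (AbsoluteDistanceRank numlist c).Pairwise (fun a b => pvKey c a ≤ pvKey c b) := by
  rw [A_eq, List.pairwise_map]
  have hpw := PySem.List.sorted_pairwise (numlist.map (fun n => (pvRank numlist c n, n)))
    (fun p => (toLex p : Lex (Int × Int)))
  refine hpw.imp_of_mem ?_
  intro p q hp hq hle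
  obtain ⟨m, hm, rfl⟩ := List.mem_map.1 ((PySem.List.mem_sorted _ _ _ _).1 hp)
  obtain ⟨n, hn, rfl⟩ := List.mem_map.1 ((PySem.List.mem_sorted _ _ _ _).1 hq)
  exact pvRank_mono numlist c
    (by unfold pvSDist; exact (PySem.List.mem_sorted _ _ _ _).2 (List.mem_map_of_mem hm))
    (by unfold pvSDist; exact (PySem.List.mem_sorted _ _ _ _).2 (List.mem_map_of_mem hn))
    hle

-- ===== VERDICT (by name: the statement is the Claim_ definition above) =====
theorem AbsoluteDistanceRank_spec : Claim_equal_AbsoluteDistanceRank := by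
  intro numlist center _
  unfold Spec_AbsoluteDistanceRank
  exact PySem.List.eq_of_perm_of_pairwise_le_of_injective (pvKey center) (pvKey_inj center)
    ((A_perm numlist center).trans (alt_perm numlist center).symm)
    (A_pairwise numlist center) (alt_pairwise numlist center)
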